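-- pv_equiv track=rewrite | github.com/tmweigand/PMMoTo | src/pmmoto/core/orientation.py | get_boundary_id
-- ===== SOURCE A (Python) =====
-- def get_boundary_id(boundary_index):
--     """
--     Determine boundary ID
--     Input: boundary_ID[3] corresponding to [x,y,z] and values of -1,0,1
--     Output: boundary_ID
--     """
--     params = [[0, 9, 18], [0, 3, 6], [0, 1, 2]]
--
--     id_ = 0
--     for n in range(0, 3):
--         if boundary_index[n] < 0:
--             id_ += params[n][0]
--         elif boundary_index[n] > 0:
--             id_ += params[n][1]
--         else:
--             id_ += params[n][2]
--
--     return id_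
-- ===== SOURCE B (Python) =====
-- def get_boundary_id(boundary_index):
--     """Generate-and-test: scan candidate ids 0..26 and return the first whose
--     base-3 decoding matches the sign pattern of the input (a negative
--     component decodes to digit 0, a positive one to 1, zero to 2).
--     Correct because id -> (id//9, id//3%3, id%3) enumerates every digit
--     triple exactly once over 0..26, so exactly one candidate matches."""
--     def digit_matches(d, v):
--         if v < 0:
--             return d == 0
--         if v > 0:
--             return d == 1
--         return d == 2
--
--     for cand in range(27):
--         if (digit_matches(cand // 9, boundary_index[0])
--                 and digit_matches(cand // 3 % 3, boundary_index[1])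
--                 and digit_matches(cand % 3, boundary_index[2])):
--             return cand
-- ===== Notes on version B (the rewrite author's own statement) =====
-- stated objective: alternative
-- what changed: Replaced the table-lookup accumulator loop over the three components with a generate-and-test search over the 27 candidate boundary ids, returning the first candidate whose base-3 decoding matches the input's sign pattern.
import Mathlib
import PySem

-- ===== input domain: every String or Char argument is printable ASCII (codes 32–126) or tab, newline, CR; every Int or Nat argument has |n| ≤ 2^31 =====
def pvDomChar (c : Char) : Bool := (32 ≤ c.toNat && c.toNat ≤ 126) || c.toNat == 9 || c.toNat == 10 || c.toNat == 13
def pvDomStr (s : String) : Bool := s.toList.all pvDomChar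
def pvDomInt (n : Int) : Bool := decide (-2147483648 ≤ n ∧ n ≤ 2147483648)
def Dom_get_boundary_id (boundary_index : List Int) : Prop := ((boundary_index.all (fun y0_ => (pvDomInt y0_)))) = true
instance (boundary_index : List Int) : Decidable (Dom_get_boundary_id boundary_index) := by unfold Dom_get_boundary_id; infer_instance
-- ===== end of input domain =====

-- B replaces A's table-lookup accumulator loop with a generate-and-test
-- search over the 27 candidate ids; objective: alternative (same O(1) cost).

-- ===== PORT A =====
-- literal port of A's loop over range(0,3) with the params table;
-- pyGet? is none on IndexError (Pre_ excludes lists shorter than 3)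
def get_boundary_id (boundary_index : List Int) : Int :=
  let params : List (List Int) := [[0, 9, 18], [0, 3, 6], [0, 1, 2]]
  (PySem.List.pyRange 0 3 1).foldl (fun id_ n =>
    let b := (PySem.List.pyGet? boundary_index n).getD 0
    let p := (PySem.List.pyGet? params n).getD []
    if b < 0 then id_ + (PySem.List.pyGet? p 0).getD 0
    else if b > 0 then id_ + (PySem.List.pyGet? p 1).getD 0
    else id_ + (PySem.List.pyGet? p 2).getD 0) 0

-- ===== PORT B =====
-- helper digit_matches of Source B
def pvDigitMatches (d v : Int) : Bool :=
  if v < 0 then d == 0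
  else if v > 0 then d == 1
  else d == 2

-- Source B's 'for cand in range(27): if …: return cand' = first match in the range;
-- the search always succeeds on lists of length ≥ 3 (Pre_), so the getD 0
-- default (Python's implicit None) is unreachable there.
def get_boundary_id_alt (boundary_index : List Int) : Int :=
  ((PySem.List.pyRange 0 27 1).find? (fun cand =>
      pvDigitMatches (PySem.Int.floordiv cand 9) ((PySem.List.pyGet? boundary_index 0).getD 0)
      && pvDigitMatches (PySem.Int.mod (PySem.Int.floordiv cand 3) 3) ((PySem.List.pyGet? boundary_index 1).getD 0)
      && pvDigitMatches (PySem.Int.mod cand 3) ((PySem.List.pyGet? boundary_index 2).getD 0))).getD 0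

-- ===== PRECONDITION & SPEC =====
-- Both A and B index elements 0..2 and raise IndexError on shorter lists.
def Pre_get_boundary_id (boundary_index : List Int) : Prop := 3 ≤ boundary_index.length
instance (boundary_index : List Int) : Decidable (Pre_get_boundary_id boundary_index) := by unfold Pre_get_boundary_id; infer_instance

def pvWitness_get_boundary_id : List Int := [-1, 0, 1]

def Spec_get_boundary_id (boundary_index : List Int) (out : Int) : Prop := out = get_boundary_id_alt boundary_index
instance (boundary_index : List Int) (out : Int) : Decidable (Spec_get_boundary_id boundary_index out) := by unfold Spec_get_boundary_id; infer_instance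

-- ===== CLAIM (what is proved, stated in full; the proofs are below) =====
def Claim_equal_get_boundary_id : Prop := ∀ (boundary_index : List Int), Dom_get_boundary_id boundary_index → Pre_get_boundary_id boundary_index → Spec_get_boundary_id boundary_index (get_boundary_id boundary_index)

-- ===== LEMMAS AND PROOFS =====
-- the canonical digit of a component: 0 for negative, 1 for positive, 2 for zero
def pvEnc (v : Int) : Int := if v < 0 then 0 else if v > 0 then 1 else 2

theorem pvEnc_cases (v : Int) : pvEnc v = 0 ∨ pvEnc v = 1 ∨ pvEnc v = 2 := by
  unfold pvEnc; split_ifs <;> simp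

theorem pvDigitMatches_eq (d v : Int) : pvDigitMatches d v = (d == pvEnc v) := by
  unfold pvDigitMatches pvEnc; split_ifs <;> rfl

-- the search over 0..26 finds exactly the base-3 encoding of the digit triple
theorem pv_find (e0 e1 e2 : Int)
    (h0 : e0 = 0 ∨ e0 = 1 ∨ e0 = 2) (h1 : e1 = 0 ∨ e1 = 1 ∨ e1 = 2)
    (h2 : e2 = 0 ∨ e2 = 1 ∨ e2 = 2) :
    (((PySem.List.pyRange 0 27 1).find? (fun cand =>
        (PySem.Int.floordiv cand 9 == e0)
        && (PySem.Int.mod (PySem.Int.floordiv cand 3) 3 == e1)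
        && (PySem.Int.mod cand 3 == e2))).getD 0) = 9 * e0 + 3 * e1 + e2 := by
  rcases h0 with rfl | rfl | rfl <;> rcases h1 with rfl | rfl | rfl <;>
    rcases h2 with rfl | rfl | rfl <;> decide

theorem pv_get0 (x y z : Int) (r : List Int) : PySem.List.pyGet? (x::y::z::r) 0 = some x := by
  rw [PySem.List.pyGet?_of_nonneg (x::y::z::r) (i := 0) (by norm_num)]; norm_num

theorem pv_get1 (x y z : Int) (r : List Int) : PySem.List.pyGet? (x::y::z::r) 1 = some y := by
  rw [PySem.List.pyGet?_of_nonneg (x::y::z::r) (i := 1) (by norm_num)]; norm_num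

theorem pv_get2 (x y z : Int) (r : List Int) : PySem.List.pyGet? (x::y::z::r) 2 = some z := by
  rw [PySem.List.pyGet?_of_nonneg (x::y::z::r) (i := 2) (by norm_num)]; simp

theorem pv_alt_cons3 (x y z : Int) (r : List Int) :
    get_boundary_id_alt (x :: y :: z :: r) = 9 * pvEnc x + 3 * pvEnc y + pvEnc z := by
  have h := pv_find (pvEnc x) (pvEnc y) (pvEnc z) (pvEnc_cases x) (pvEnc_cases y) (pvEnc_cases z)
  simpa [get_boundary_id_alt, pvDigitMatches_eq, pv_get0, pv_get1, pv_get2] using h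

theorem pv_a_cons3 (x y z : Int) (r : List Int) :
    get_boundary_id (x :: y :: z :: r) = 9 * pvEnc x + 3 * pvEnc y + pvEnc z := by
  have h0 := pv_get0 x y z r; have h1 := pv_get1 x y z r; have h2 := pv_get2 x y z r
  have hr : PySem.List.pyRange 0 3 1 = [0, 1, 2] := by decide
  have P : ∀ (i j v : Int),
      (PySem.List.pyGet? ((PySem.List.pyGet? ([[0,9,18],[0,3,6],[0,1,2]] : List (List Int)) i).getD []) j).getD 0 = v →
      (PySem.List.pyGet? ((PySem.List.pyGet? ([[0,9,18],[0,3,6],[0,1,2]] : List (List Int)) i).getD []) j).getD 0 = v :=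
    fun _ _ _ h => h
  simp only [get_boundary_id, pvEnc, hr, List.foldl, h0, h1, h2,
    P 0 0 0 (by decide), P 0 1 9 (by decide), P 0 2 18 (by decide),
    P 1 0 0 (by decide), P 1 1 3 (by decide), P 1 2 6 (by decide),
    P 2 0 0 (by decide), P 2 1 1 (by decide), P 2 2 2 (by decide),
    Option.getD_some]
  split_ifs <;> omega

-- ===== VERDICT (by name: the statement is the Claim_ definition above) =====
theorem get_boundary_id_spec : Claim_equal_get_boundary_id := by
  intro bi _ hpre
  match bi with
  | x :: y :: z :: r =>
    show get_boundary_id _ = get_boundary_id_alt _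
    rw [pv_a_cons3, pv_alt_cons3]
  | [] | [_] | [_, _] => simp [Pre_get_boundary_id] at hpre
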